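-- pv_equiv track=rewrite | github.com/AlexProsku/Py_alg | les_4/les_4_task_1.py | frqnc_2
-- ===== SOURCE A (Python) =====
-- def frqnc_2(min_range, max_range, min_multiple, max_multiple):
--     range_lst = list(range(min_range, max_range + 1))
--     multiple_lst = list(range(min_multiple, max_multiple + 1))
--
--     def c_frqnc_1():
--         print_ = ''
--         for m in multiple_lst:
--             def c2_frqnc_1():
--                 count_ = 0
--                 for r in range_lst:
--                     if r % m == 0:
--                         count_ += 1
--                 return f'Числу {m} кратно {count_} число/ла/ел из диапазона {min_range} - {max_range}\n'
--             print_ += c2_frqnc_1()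
--         return print_
--     return c_frqnc_1()
-- ===== SOURCE B (Python) =====
-- def frqnc_2(min_range, max_range, min_multiple, max_multiple):
--     def line(m):
--         if min_range > max_range:
--             count = 0
--         else:
--             k = abs(m)
--             count = max_range // k - (min_range - 1) // k
--         return f'Числу {m} кратно {count} число/ла/ел из диапазона {min_range} - {max_range}\n'
--     return ''.join(line(m) for m in range(min_multiple, max_multiple + 1))
-- ===== Notes on version B (the rewrite author's own statement) =====
-- stated objective: alternative
-- what changed: Replaces the inner scan over the whole range with the closed-form count max//|m| - (min-1)//|m| per multiple, and builds the result with str.join instead of repeated string concatenation.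
import Mathlib
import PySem

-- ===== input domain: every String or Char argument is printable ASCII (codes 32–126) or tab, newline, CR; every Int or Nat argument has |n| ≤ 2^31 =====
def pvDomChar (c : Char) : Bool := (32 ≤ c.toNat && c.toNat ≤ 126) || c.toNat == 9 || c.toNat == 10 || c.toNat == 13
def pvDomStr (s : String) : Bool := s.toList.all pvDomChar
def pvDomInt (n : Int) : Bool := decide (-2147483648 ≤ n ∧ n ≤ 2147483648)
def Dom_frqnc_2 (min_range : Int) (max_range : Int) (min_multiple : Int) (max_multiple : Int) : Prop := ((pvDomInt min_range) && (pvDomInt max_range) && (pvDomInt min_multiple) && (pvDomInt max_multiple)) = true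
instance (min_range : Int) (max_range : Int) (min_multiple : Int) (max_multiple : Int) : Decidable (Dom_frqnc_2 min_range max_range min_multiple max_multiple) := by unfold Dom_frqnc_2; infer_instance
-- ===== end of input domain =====

-- B computes each count in closed form (⌊max/|m|⌋-⌊(min-1)/|m|⌋) instead of scanning the range, and joins the lines; objective: alternative.


-- ===== PORT A =====
def frqnc_2 (min_range : Int) (max_range : Int) (min_multiple : Int) (max_multiple : Int) : String :=
  let range_lst := PySem.List.pyRange min_range (max_range + 1) 1
  let multiple_lst := PySem.List.pyRange min_multiple (max_multiple + 1) 1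
  multiple_lst.foldl (fun print_ m =>
    print_ ++
      (let count_ : Int := range_lst.foldl (fun c r => if PySem.Int.mod r m == 0 then c + 1 else c) 0
       "Числу " ++ PySem.Int.toStr m ++ " кратно " ++ PySem.Int.toStr count_ ++
         " число/ла/ел из диапазона " ++ PySem.Int.toStr min_range ++ " - " ++ PySem.Int.toStr max_range ++ "\n")) ""

-- ===== PORT B =====
def frqnc_2_alt (min_range : Int) (max_range : Int) (min_multiple : Int) (max_multiple : Int) : String :=
  PySem.Str.join "" ((PySem.List.pyRange min_multiple (max_multiple + 1) 1).map (fun m =>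
    let count : Int :=
      if min_range > max_range then 0
      else
        let k : Int := |m|
        PySem.Int.floordiv max_range k - PySem.Int.floordiv (min_range - 1) k
    "Числу " ++ PySem.Int.toStr m ++ " кратно " ++ PySem.Int.toStr count ++
      " число/ла/ел из диапазона " ++ PySem.Int.toStr min_range ++ " - " ++ PySem.Int.toStr max_range ++ "\n"))

-- ===== PRECONDITION & SPEC =====
-- Pre_ excludes exactly the inputs where A raises ZeroDivisionError: a nonempty range together with 0 among the multiples (B raises there too).
def Pre_frqnc_2 (min_range : Int) (max_range : Int) (min_multiple : Int) (max_multiple : Int) : Prop :=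
  min_range ≤ max_range → ¬(min_multiple ≤ 0 ∧ 0 ≤ max_multiple)
instance (min_range : Int) (max_range : Int) (min_multiple : Int) (max_multiple : Int) : Decidable (Pre_frqnc_2 min_range max_range min_multiple max_multiple) := by unfold Pre_frqnc_2; infer_instance
def pvWitness_frqnc_2 : Int × Int × Int × Int := (1, 10, 1, 3)

def Spec_frqnc_2 (min_range : Int) (max_range : Int) (min_multiple : Int) (max_multiple : Int) (out : String) : Prop := out = frqnc_2_alt min_range max_range min_multiple max_multiple
instance (min_range : Int) (max_range : Int) (min_multiple : Int) (max_multiple : Int) (out : String) : Decidable (Spec_frqnc_2 min_range max_range min_multiple max_multiple out) := by unfold Spec_frqnc_2; infer_instance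

-- ===== CLAIM (what is proved, stated in full; the proofs are below) =====
def Claim_equal_frqnc_2 : Prop := ∀ (min_range : Int) (max_range : Int) (min_multiple : Int) (max_multiple : Int), Dom_frqnc_2 min_range max_range min_multiple max_multiple → Pre_frqnc_2 min_range max_range min_multiple max_multiple → Spec_frqnc_2 min_range max_range min_multiple max_multiple (frqnc_2 min_range max_range min_multiple max_multiple)

-- ===== LEMMAS AND PROOFS =====

theorem join_empty_cons (s : String) (rest : List String) :
    PySem.Str.join "" (s :: rest) = s ++ PySem.Str.join "" rest := by
  rw [← String.toList_inj]
  simp [PySem.Str.toList_join, PySem.Chars.join, List.intercalate]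
  induction rest with
  | nil => simp
  | cons y ys ih => simp at *

theorem fold_append_eq_join (f : Int → String) : ∀ (l : List Int) (acc : String),
    l.foldl (fun a m => a ++ f m) acc = acc ++ PySem.Str.join "" (l.map f) := by
  intro l
  induction l with
  | nil =>
    intro acc
    show acc = acc ++ PySem.Str.join "" []
    have h : PySem.Str.join "" [] = "" := by rfl
    rw [h]; exact String.append_empty.symm
  | cons x xs ih =>
    intro acc
    simp only [List.foldl_cons, List.map_cons, ih, join_empty_cons]
    rw [String.append_assoc]

theorem div_step (k b : Int) (hk : 0 < k) :
    b / k = (b - 1) / k + (if k ∣ b then 1 else 0) := by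
  have hqr := Int.mul_ediv_add_emod b k
  have hr0 : 0 ≤ b % k := Int.emod_nonneg b (ne_of_gt hk)
  have hrk : b % k < k := Int.emod_lt_of_pos b hk
  have hsplit : b - 1 = (b % k - 1) + k * (b / k) := by omega
  have hb1 : (b - 1) / k = (b % k - 1) / k + (b / k) := by
    rw [hsplit, Int.add_mul_ediv_left _ _ (ne_of_gt hk)]
  have hdvd : k ∣ b ↔ b % k = 0 := Int.dvd_iff_emod_eq_zero
  by_cases h : b % k = 0
  · have hneg : ((-1 : Int)) / k = -1 := by
      have h2 : (k - 1 + k * (-1)) / k = (k - 1) / k + (-1) :=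
        Int.add_mul_ediv_left _ _ (ne_of_gt hk)
      have h3 : k - 1 + k * (-1) = -1 := by ring
      have h4 : (k - 1) / k = 0 := Int.ediv_eq_zero_of_lt (by omega) (by omega)
      rw [h3, h4] at h2; omega
    have : (b % k - 1) / k = -1 := by rw [h]; simpa using hneg
    rw [if_pos (hdvd.mpr h)]; omega
  · have : (b % k - 1) / k = 0 := Int.ediv_eq_zero_of_lt (by omega) (by omega)
    rw [if_neg (fun hd => h (hdvd.mp hd))]; omega

theorem count_range (k : Int) (hk : 0 < k) : ∀ (n : Nat) (a : Int),
    ((PySem.List.pyRange a (a + n) 1).countP (fun r => decide (k ∣ r)) : Int)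
      = (a + n - 1) / k - (a - 1) / k := by
  intro n
  induction n with
  | zero =>
    intro a
    rw [PySem.List.pyRange_one_eq_nil (by omega)]
    simp
  | succ n ih =>
    intro a
    have hstep : a + ((n : Int) + 1) = (a + n) + 1 := by ring
    rw [show ((n + 1 : Nat) : Int) = (n : Int) + 1 by push_cast; ring, hstep,
        PySem.List.pyRange_one_succ_right (by omega), List.countP_append]
    have hd := div_step k (a + n) hk
    have hih := ih a
    simp only [List.countP_cons, List.countP_nil]
    by_cases h : k ∣ (a + n)
    · rw [if_pos h] at hd
      simp only [h, decide_true]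
      push_cast
      rw [show a + (n : Int) + 1 - 1 = a + (n : Int) by ring]
      omega
    · rw [if_neg h] at hd
      simp only [h, decide_false]
      push_cast
      rw [show a + (n : Int) + 1 - 1 = a + (n : Int) by ring]
      omega

-- the two per-multiple line builders agree for every admitted multiple m
theorem line_eq (min_range max_range : Int) (m : Int) (hm : min_range ≤ max_range → m ≠ 0) :
    ((PySem.List.pyRange min_range (max_range + 1) 1).foldl
        (fun c r => if PySem.Int.mod r m == 0 then c + 1 else c) (0 : Int))
      = (if min_range > max_range then 0
         else PySem.Int.floordiv max_range |m| - PySem.Int.floordiv (min_range - 1) |m|) := by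
  by_cases hab : min_range ≤ max_range
  · have hm0 : m ≠ 0 := hm hab
    have hkpos : (0 : Int) < |m| := abs_pos.mpr hm0
    rw [PySem.List.foldl_if_add_one]
    have hcong : (PySem.List.pyRange min_range (max_range + 1) 1).countP
          (fun r => PySem.Int.mod r m == 0)
        = (PySem.List.pyRange min_range (max_range + 1) 1).countP (fun r => decide (|m| ∣ r)) := by
      apply List.countP_congr
      intro r _
      simp [PySem.Int.mod_eq_zero_iff_dvd, abs_dvd]
    have hn : min_range + ((max_range + 1 - min_range).toNat : Int) = max_range + 1 := by omega
    have hcount := count_range |m| hkpos (max_range + 1 - min_range).toNat min_range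
    rw [hn] at hcount
    rw [hcong, hcount, if_neg (by omega),
        PySem.Int.floordiv_eq_ediv_of_pos hkpos, PySem.Int.floordiv_eq_ediv_of_pos hkpos]
    ring_nf
  · rw [PySem.List.pyRange_one_eq_nil (by omega)]
    simp [if_pos (by omega : min_range > max_range)]

-- ===== VERDICT (by name: the statement is the Claim_ definition above) =====
theorem frqnc_2_spec : Claim_equal_frqnc_2 := by
  unfold Claim_equal_frqnc_2
  intro a b mlo mhi _ hpre
  unfold Spec_frqnc_2 frqnc_2 frqnc_2_alt
  rw [PySem.List.foldl_congr_mem' _ _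
      (fun print_ m =>
        print_ ++ ("Числу " ++ PySem.Int.toStr m ++ " кратно " ++
          PySem.Int.toStr (if a > b then 0
            else PySem.Int.floordiv b |m| - PySem.Int.floordiv (a - 1) |m|) ++
          " число/ла/ел из диапазона " ++ PySem.Int.toStr a ++ " - " ++ PySem.Int.toStr b ++ "\n"))
      _ ?_ ]
  · rw [fold_append_eq_join]
    rw [← String.toList_inj]
    simp
  · intro m hmem acc
    have hmr := (PySem.List.mem_pyRange_one).mp hmem
    have hm : a ≤ b → m ≠ 0 := by
      intro hab
      have := hpre hab
      omega
    rw [line_eq a b m hm]
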